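-- pv_equiv track=rewrite | github.com/christianrb2402-boop/trading-bot | execution/intraday_core_engine.py | _map_net_gate_reasons
-- ===== SOURCE A (Python) =====
-- from typing import Any, Sequence
--
-- def _map_net_gate_reasons(rejection_reasons: Sequence[str]) -> list[str]:
--     simple_reasons: list[str] = []
--     for reason in rejection_reasons:
--         lowered = reason.lower()
--         if "signal is not actionable" in lowered:
--             simple_reasons.append("signal_not_actionable")
--         elif "net reward/risk" in lowered:
--             simple_reasons.append("net_reward_risk_too_low")
--         elif any(marker in lowered for marker in ("expected net edge", "expected move", "cost drag", "minimum profitable move", "estimated costs", "covers ")):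
--             simple_reasons.append("costs_consume_target")
--         elif "volatility headroom" in lowered:
--             simple_reasons.append("signal_not_actionable")
--     return simple_reasons or ["costs_consume_target"]
-- ===== SOURCE B (Python) =====
-- from typing import Any, Sequence
--
-- _STAGES = [
--     (("signal is not actionable",), "signal_not_actionable"),
--     (("net reward/risk",), "net_reward_risk_too_low"),
--     (("expected net edge", "expected move", "cost drag", "minimum profitable move",
--       "estimated costs", "covers "), "costs_consume_target"),
--     (("volatility headroom",), "signal_not_actionable"),
-- ]
--
-- def _map_net_gate_reasons(rejection_reasons):
--     texts = [r.lower() for r in rejection_reasons]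
--     labels = [None] * len(texts)
--     for markers, code in _STAGES:
--         for i, text in enumerate(texts):
--             if labels[i] is None and any(m in text for m in markers):
--                 labels[i] = code
--     out = [lab for lab in labels if lab is not None]
--     return out or ["costs_consume_target"]
-- ===== Notes on version B (the rewrite author's own statement) =====
-- stated objective: alternative
-- what changed: Replaces A's reason-major single pass with an if/elif first-match chain by a category-major algorithm: a parallel labels array starts all-None and one whole-list pass per category, in priority order, claims the still-unlabeled reasons whose text contains one of that category's markers; the non-None labels are then collected in original order.
import Mathlib
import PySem

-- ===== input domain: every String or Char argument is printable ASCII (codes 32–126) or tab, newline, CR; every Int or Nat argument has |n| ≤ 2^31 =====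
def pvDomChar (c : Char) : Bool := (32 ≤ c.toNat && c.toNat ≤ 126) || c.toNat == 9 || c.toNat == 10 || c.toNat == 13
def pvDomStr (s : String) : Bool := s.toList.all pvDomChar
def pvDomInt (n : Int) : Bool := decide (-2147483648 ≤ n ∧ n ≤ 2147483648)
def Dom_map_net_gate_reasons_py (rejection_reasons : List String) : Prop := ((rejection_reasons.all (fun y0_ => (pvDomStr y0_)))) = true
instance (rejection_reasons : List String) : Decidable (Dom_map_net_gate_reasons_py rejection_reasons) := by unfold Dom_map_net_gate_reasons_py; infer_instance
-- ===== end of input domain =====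

-- B replaces A's reason-major first-match chain by category-major staged passes over a parallel labels array (alternative decomposition; same asymptotic cost, not claimed faster).

-- ===== PORT A =====
def map_net_gate_reasons_py (rejection_reasons : List String) : List String :=
  let simple_reasons := rejection_reasons.foldl (fun acc reason =>
    let lowered := PySem.Str.lower reason
    if PySem.Str.isIn "signal is not actionable" lowered then
      acc ++ ["signal_not_actionable"]
    else if PySem.Str.isIn "net reward/risk" lowered then
      acc ++ ["net_reward_risk_too_low"]
    else if ["expected net edge", "expected move", "cost drag", "minimum profitable move",
             "estimated costs", "covers "].any (fun marker => PySem.Str.isIn marker lowered) then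
      acc ++ ["costs_consume_target"]
    else if PySem.Str.isIn "volatility headroom" lowered then
      acc ++ ["signal_not_actionable"]
    else acc) []
  if simple_reasons = [] then ["costs_consume_target"] else simple_reasons

-- ===== PORT B =====
def pvStages : List (List String × String) :=
  [ (["signal is not actionable"], "signal_not_actionable"),
    (["net reward/risk"], "net_reward_risk_too_low"),
    (["expected net edge", "expected move", "cost drag", "minimum profitable move",
      "estimated costs", "covers "], "costs_consume_target"),
    (["volatility headroom"], "signal_not_actionable") ]

def map_net_gate_reasons_py_alt (rejection_reasons : List String) : List String :=
  let texts := rejection_reasons.map (fun r => PySem.Str.lower r)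
  let labels := List.replicate texts.length (none : Option String)
  let labels := pvStages.foldl (fun labels stage =>
    List.zipWith (fun lab text =>
      if lab.isNone && stage.1.any (fun m => PySem.Str.isIn m text)
      then some stage.2 else lab) labels texts) labels
  let out := labels.filterMap (fun lab => lab)
  if out = [] then ["costs_consume_target"] else out

-- ===== PRECONDITION & SPEC =====
def Spec_map_net_gate_reasons_py (rejection_reasons : List String) (out : List String) : Prop := out = map_net_gate_reasons_py_alt rejection_reasons
instance (rejection_reasons : List String) (out : List String) : Decidable (Spec_map_net_gate_reasons_py rejection_reasons out) := by unfold Spec_map_net_gate_reasons_py; infer_instance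

-- ===== CLAIM (what is proved, stated in full; the proofs are below) =====
def Claim_equal_map_net_gate_reasons_py : Prop := ∀ (rejection_reasons : List String), Dom_map_net_gate_reasons_py rejection_reasons → Spec_map_net_gate_reasons_py rejection_reasons (map_net_gate_reasons_py rejection_reasons)

-- ===== LEMMAS AND PROOFS =====

-- B's per-label staged update (one stage applied to one label slot).
def pvOptStep (stage : List String × String) (o : Option String) (t : String) : Option String :=
  if o.isNone && stage.1.any (fun m => PySem.Str.isIn m t) then some stage.2 else o

-- First stage (in order) one of whose markers occurs in t (proof vocabulary only).
def pvFirstMatch (stages : List (List String × String)) (t : String) : Option String :=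
  match stages with
  | [] => none
  | s :: ss => if s.1.any (fun m => PySem.Str.isIn m t) then some s.2 else pvFirstMatch ss t

-- replicate over a list's length is a constant map.
theorem pv_replicate_eq_map {α β : Type} (c : β) (ts : List α) :
    List.replicate ts.length c = ts.map (fun _ => c) := by
  induction ts with
  | nil => rfl
  | cons t ts ih =>
    simp only [List.length_cons, List.replicate_succ, List.map_cons]
    rw [ih]

-- zipWith of a mapped list against the list itself is a single map.
theorem pv_zipWith_map_left {α β γ : Type} (f : β → α → γ) (h : α → β) (ts : List α) :
    List.zipWith f (ts.map h) ts = ts.map (fun t => f (h t) t) := by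
  induction ts with
  | nil => rfl
  | cons t ts ih => simp [ih]

-- Staged whole-list zipWith passes commute to a per-slot fold over the stages.
theorem pv_stage_fold_zip (step : List String × String → Option String → String → Option String)
    (stages : List (List String × String)) (h : String → Option String) (ts : List String) :
    stages.foldl (fun labels stage => List.zipWith (fun lab t => step stage lab t) labels ts)
        (ts.map h)
      = ts.map (fun t => stages.foldl (fun o stage => step stage o t) (h t)) := by
  induction stages generalizing h with
  | nil => simp
  | cons s ss ih =>
    simp only [List.foldl]
    rw [pv_zipWith_map_left, ih]

-- A labeled slot is never relabeled.
theorem pv_opt_fold_some (ss : List (List String × String)) (v t : String) :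
    ss.foldl (fun o s => pvOptStep s o t) (some v) = some v := by
  induction ss with
  | nil => rfl
  | cons s ss ih => simpa [List.foldl, pvOptStep] using ih

-- The per-slot fold computes the first matching stage's code.
theorem pv_opt_spec (stages : List (List String × String)) (t : String) :
    stages.foldl (fun o s => pvOptStep s o t) none = pvFirstMatch stages t := by
  induction stages with
  | nil => rfl
  | cons s ss ih =>
    simp only [List.foldl, pvFirstMatch]
    cases h : s.1.any (fun m => PySem.Str.isIn m t)
    · rw [show pvOptStep s (none : Option String) t = none by
        unfold pvOptStep; simp only [Option.isNone_none, Bool.true_and]; rw [h]; simp]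
      rw [ih]; simp
    · rw [show pvOptStep s (none : Option String) t = some s.2 by
        unfold pvOptStep; simp only [Option.isNone_none, Bool.true_and]; rw [h]; simp]
      rw [pv_opt_fold_some]; simp

-- A's if/elif tests, bridged to the first-match over B's stage table.
theorem pv_head_eq (t : String) : pvFirstMatch pvStages t =
    (if PySem.Str.isIn "signal is not actionable" t then some "signal_not_actionable"
     else if PySem.Str.isIn "net reward/risk" t then some "net_reward_risk_too_low"
     else if ["expected net edge", "expected move", "cost drag", "minimum profitable move",
              "estimated costs", "covers "].any (fun m => PySem.Str.isIn m t) then some "costs_consume_target"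
     else if PySem.Str.isIn "volatility headroom" t then some "signal_not_actionable"
     else none) := by
  simp only [pvFirstMatch, pvStages, List.any_cons, List.any_nil, Bool.or_false]

-- Conditional appends, expressed as appending an optional element (abstract Booleans).
theorem pv_append_chain (a b m c : Bool) (acc : List String) :
    (if a then acc ++ ["signal_not_actionable"]
     else if b then acc ++ ["net_reward_risk_too_low"]
     else if m then acc ++ ["costs_consume_target"]
     else if c then acc ++ ["signal_not_actionable"]
     else acc)
    = acc ++ (if a then some "signal_not_actionable"
              else if b then some "net_reward_risk_too_low"
              else if m then some "costs_consume_target"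
              else if c then some "signal_not_actionable"
              else (none : Option String)).toList := by
  cases a <;> cases b <;> cases m <;> cases c <;> simp

theorem pv_filterMap_cons_toList {α β : Type} (f : α → Option β) (x : α) (xs : List α) :
    (x :: xs).filterMap f = (f x).toList ++ xs.filterMap f := by
  cases h : f x <;> simp [h]

-- A's append-accumulating fold equals acc ++ the filterMap of the per-element category.
theorem pv_A_fold_eq (rs : List String) (acc : List String) :
    rs.foldl (fun acc reason =>
      let lowered := PySem.Str.lower reason
      if PySem.Str.isIn "signal is not actionable" lowered then
        acc ++ ["signal_not_actionable"]
      else if PySem.Str.isIn "net reward/risk" lowered then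
        acc ++ ["net_reward_risk_too_low"]
      else if ["expected net edge", "expected move", "cost drag", "minimum profitable move",
               "estimated costs", "covers "].any (fun marker => PySem.Str.isIn marker lowered) then
        acc ++ ["costs_consume_target"]
      else if PySem.Str.isIn "volatility headroom" lowered then
        acc ++ ["signal_not_actionable"]
      else acc) acc
    = acc ++ rs.filterMap (fun r => pvFirstMatch pvStages (PySem.Str.lower r)) := by
  induction rs generalizing acc with
  | nil => simp
  | cons r rs ih =>
    simp only [List.foldl]
    rw [ih, pv_append_chain, pv_filterMap_cons_toList, pv_head_eq, List.append_assoc]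

-- ===== VERDICT (by name: the statement is the Claim_ definition above) =====
theorem map_net_gate_reasons_py_spec : Claim_equal_map_net_gate_reasons_py := by
  intro rs _
  unfold Spec_map_net_gate_reasons_py
  simp only [map_net_gate_reasons_py, map_net_gate_reasons_py_alt]
  rw [pv_A_fold_eq, pv_replicate_eq_map]
  rw [show (fun (labels : List (Option String)) (stage : List String × String) =>
      List.zipWith (fun lab text =>
        if lab.isNone && stage.1.any (fun m => PySem.Str.isIn m text)
        then some stage.2 else lab) labels (rs.map (fun r => PySem.Str.lower r)))
      = (fun labels stage => List.zipWith (fun lab t => pvOptStep stage lab t) labels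
          (rs.map (fun r => PySem.Str.lower r))) from rfl]
  rw [pv_stage_fold_zip]
  simp only [pv_opt_spec, List.map_map, Function.comp, List.filterMap_map]
  simp
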